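/-
  THE TEXT RECORD OF THE BASE-IMAGE PLATFORM: the text window `[100000H, 140000H)` — the same in EVERY program linked against the
  base image (c/layout.py: TEXT_CAP) — and `__asan_report` at 100059H (c/base/start.S). Every contract of a base function and of
  a program on the base image is stated for this `T`; it is a closed term, so those contracts and their proofs are closed too.
-/
import ProgX.Text
import ProgX.Spec.Attr
import ProgX.Base.Labels
namespace ProgX.Base

/-- **The text window and the report address of every image built on the base.** -/
abbrev T : Text := ⟨L.textLo, L.textHi, L.report, by decide, by decide⟩

/-- The window's ends and the report address as numerals (for `simp only [vspec]` / `rw`: `omega` does not unfold `T`). -/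
@[vspec] theorem T_lo : T.lo = 0x100000 := rfl
@[vspec] theorem T_hi : T.hi = 0x140000 := rfl
@[vspec] theorem T_report : T.report = 0x100059 := rfl

end ProgX.Base

namespace ProgX.Base

/-- The end of the text window as the numeral that `LiveIn.where_` states (ProgX/Text.lean: `Text.HiIs`). -/
instance T_hiIs : T.HiIs 0x140000 := ⟨rfl⟩

end ProgX.Base
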